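-- pv_equiv track=rewrite | github.com/joshuamchavez2/python-exercises | function_excerises.py | leading_spaces
-- ===== SOURCE A (Python) =====
-- def leading_spaces(input_value):
--     '''cleaned_string is currently a declared empty string.  it will eventually
--     be my return value.'''
--     cleaned_string = ""
--
--     '''I am enumerating through input_value to find the first leading
--     none space " " char'''
--     for index, value in enumerate(input_value):
--         if value != " ":
--             '''once i find the first none space char, i am taking that index of
--             that no space char and start to rebuild the original string
--             starting at that index.  which will remove any leading spaces.'''
--             for i in range(index, len(input_value)):
--                 cleaned_string += input_value[i]
--             '''after my string it built there is no need to continue the loop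
--             as the starting index was already found so i break out of it.'''
--             break
--
--     return cleaned_string
-- ===== SOURCE B (Python) =====
-- def leading_spaces(input_value):
--     cleaned_string = ""
--     started = False
--     for c in input_value:
--         if not started and c == " ":
--             continue
--         started = True
--         cleaned_string += c
--     return cleaned_string
-- ===== Notes on version B (the rewrite author's own statement) =====
-- stated objective: alternative
-- what changed: Replaces A's two-phase scan (find the first non-space index, then an inner loop re-reading the string by index to rebuild the suffix) with a single flat pass over the characters keeping a boolean flag for whether a non-space has been seen.
import Mathlib
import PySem

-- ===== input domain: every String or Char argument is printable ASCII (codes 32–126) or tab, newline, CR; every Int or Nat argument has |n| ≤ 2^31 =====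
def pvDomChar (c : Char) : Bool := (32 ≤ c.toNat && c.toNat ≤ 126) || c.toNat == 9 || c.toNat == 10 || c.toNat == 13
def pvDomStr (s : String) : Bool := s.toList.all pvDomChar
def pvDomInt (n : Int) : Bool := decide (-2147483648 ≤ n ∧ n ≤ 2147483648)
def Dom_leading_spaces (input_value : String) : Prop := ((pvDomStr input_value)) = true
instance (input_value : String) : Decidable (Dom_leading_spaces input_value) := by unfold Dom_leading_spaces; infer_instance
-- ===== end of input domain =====

-- B changes A's two-phase scan (find first non-space index, then rebuild the suffix by index)
-- into a single flat pass with a 'started' flag.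

-- ===== PORT A =====
-- Inner loop 'for i in range(index, len(input_value)): cleaned_string += input_value[i]':
-- at the point the outer loop stands at index, input_value[index:] is exactly the current
-- suffix, so the index loop is transcribed as a push-fold over that suffix (same chars, same order).
def leadingSpacesAuxA : List Char → String
  | [] => ""
  | c :: rest =>
    if c ≠ ' ' then (c :: rest).foldl String.push ""
    else leadingSpacesAuxA rest

def leading_spaces (input_value : String) : String :=
  leadingSpacesAuxA input_value.toList

-- ===== PORT B =====
-- single pass: state (started, cleaned_string)
def leadingSpacesStepB (st : Bool × String) (c : Char) : Bool × String :=
  if !st.1 && c == ' ' then st else (true, st.2.push c)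

def leading_spaces_alt (input_value : String) : String :=
  (input_value.toList.foldl leadingSpacesStepB (false, "")).2

-- ===== PRECONDITION & SPEC =====
def Spec_leading_spaces (input_value : String) (out : String) : Prop := out = leading_spaces_alt input_value
instance (input_value : String) (out : String) : Decidable (Spec_leading_spaces input_value out) := by unfold Spec_leading_spaces; infer_instance

-- ===== CLAIM (what is proved, stated in full; the proofs are below) =====
def Claim_equal_leading_spaces : Prop := ∀ (input_value : String), Dom_leading_spaces input_value → Spec_leading_spaces input_value (leading_spaces input_value)

-- ===== LEMMAS AND PROOFS =====

-- once started, B's fold just pushes every remaining char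
theorem leadingSpaces_started_fold (l : List Char) (acc : String) :
    l.foldl leadingSpacesStepB (true, acc) = (true, l.foldl String.push acc) := by
  induction l generalizing acc with
  | nil => rfl
  | cons c rest ih => simp [List.foldl, leadingSpacesStepB, ih]

theorem leadingSpaces_aux_eq (l : List Char) :
    leadingSpacesAuxA l = (l.foldl leadingSpacesStepB (false, "")).2 := by
  induction l with
  | nil => rfl
  | cons c rest ih =>
    by_cases h : c = ' '
    · simp [leadingSpacesAuxA, h, List.foldl, leadingSpacesStepB, ih]
    · simp [leadingSpacesAuxA, h, List.foldl, leadingSpacesStepB,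
        leadingSpaces_started_fold]

-- ===== VERDICT (by name: the statement is the Claim_ definition above) =====
theorem leading_spaces_spec : Claim_equal_leading_spaces := by
  intro s _
  unfold Spec_leading_spaces leading_spaces leading_spaces_alt
  exact leadingSpaces_aux_eq s.toList
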